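-- pv_equiv track=rewrite | github.com/Abhinav-pro1003/WiDS5.0_Theorem_Proving | Week1/robinson.py | apply_subs
-- ===== SOURCE A (Python) =====
-- def apply_subs(term: str, subs: dict):
--     if term in subs:
--         return subs[term]
--
--     if "(" not in term:
--         return term
--
--     i = term.find("(")
--     name = term[:i]
--     inside = term[i+1:-1]
--     args = []
--     depth = 0
--     cur = ""
--
--     for ch in inside:
--         if ch == "," and depth == 0:
--             args.append(apply_subs(cur, subs))
--             cur = ""
--         else:
--             if ch == "(":
--                 depth += 1
--             elif ch == ")":
--                 depth -= 1
--             cur += ch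
--
--     if cur:
--         args.append(apply_subs(cur, subs))
--
--     return name + "(" + ",".join(args) + ")"
-- ===== SOURCE B (Python) =====
-- def _parse(t):
--     # subs-free recursive parser: returns ("leaf", t) or ("node", t, name, children)
--     if "(" not in t:
--         return ("leaf", t)
--     i = t.index("(")
--     inside = t[i + 1:-1]
--     cuts = []
--     depth = 0
--     for j, ch in enumerate(inside):
--         if ch == "(":
--             depth += 1
--         elif ch == ")":
--             depth -= 1
--         elif ch == "," and depth == 0:
--             cuts.append(j)
--     segs = []
--     start = 0
--     for j in cuts:
--         segs.append(inside[start:j])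
--         start = j + 1
--     last = inside[start:]
--     if last:
--         segs.append(last)
--     return ("node", t, t[:i], [_parse(s) for s in segs])
--
-- def _render(node, subs):
--     if node[0] == "leaf":
--         return subs.get(node[1], node[1])
--     _, orig, name, children = node
--     if orig in subs:
--         return subs[orig]
--     return name + "(" + ",".join(_render(c, subs) for c in children) + ")"
--
-- def apply_subs(term: str, subs: dict):
--     return _render(_parse(term), subs)
-- ===== Notes on version B (the rewrite author's own statement) =====
-- stated objective: alternative
-- what changed: A interleaves parsing and substitution in one recursive depth-counting loop; B first parses the term into an explicit tree with a subs-free parser (cut positions computed by an enumerate scan, then sliced), and a separate renderer walks the tree applying the substitutions.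
import Mathlib
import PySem

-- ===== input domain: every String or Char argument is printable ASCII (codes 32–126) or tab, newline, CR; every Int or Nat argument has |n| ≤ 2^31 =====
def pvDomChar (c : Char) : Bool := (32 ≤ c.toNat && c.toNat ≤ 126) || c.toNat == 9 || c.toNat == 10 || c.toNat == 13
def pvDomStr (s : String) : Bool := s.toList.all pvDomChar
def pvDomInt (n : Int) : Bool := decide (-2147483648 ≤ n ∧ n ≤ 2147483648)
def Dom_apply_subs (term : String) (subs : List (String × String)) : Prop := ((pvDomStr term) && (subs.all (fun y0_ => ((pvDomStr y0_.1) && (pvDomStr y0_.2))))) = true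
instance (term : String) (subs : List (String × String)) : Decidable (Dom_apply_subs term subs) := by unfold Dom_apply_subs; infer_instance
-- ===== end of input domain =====

-- B re-implements A as a two-phase pipeline (a subs-free recursive parser building an explicit
-- tree, then a separate renderer applying the substitutions); objective: alternative decomposition,
-- same asymptotic cost.

-- ===== PORT A =====
-- Both ports work on List Char (PySem convention); the dict is the association list with
-- first-match lookup (List.lookup).
def pySubsL (subs : List (String × String)) : List (List Char × List Char) :=
  subs.map (fun p => (p.1.toList, p.2.toList))

mutual
-- fuel is termination scaffolding only: the wrapper passes fuel > |term|, and every
-- recursive call is on a strictly shorter string, so fuel 0 is never reached.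
def pyApplySubs (fuel : Nat) (t : List Char) (subs : List (List Char × List Char)) : List Char :=
  match fuel with
  | 0 => t
  | f + 1 =>
    match List.lookup t subs with
    | some v => v
    | none =>
      if '(' ∈ t then
        let i := t.findIdx (· = '(')
        let name := t.take i
        let inside := (t.drop (i + 1)).dropLast
        let args := pyLoop f subs inside 0 [] []
        name ++ '(' :: List.intercalate [','] args ++ [')']
      else t
termination_by (fuel, 0)
-- A's for-loop over `inside` with state (depth, cur, args), including the trailing `if cur:`.
def pyLoop (f : Nat) (subs : List (List Char × List Char)) (inside : List Char)
    (depth : Int) (cur : List Char) (args : List (List Char)) : List (List Char) :=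
  match inside with
  | [] => if cur = [] then args else args ++ [pyApplySubs f cur subs]
  | ch :: rest =>
    if ch = ',' ∧ depth = 0 then
      pyLoop f subs rest depth [] (args ++ [pyApplySubs f cur subs])
    else
      let d' := if ch = '(' then depth + 1 else if ch = ')' then depth - 1 else depth
      pyLoop f subs rest d' (cur ++ [ch]) args
termination_by (f, inside.length + 1)
end

def apply_subs (term : String) (subs : List (String × String)) : String :=
  String.ofList (pyApplySubs (term.toList.length + 1) term.toList (pySubsL subs))

-- ===== PORT B =====
mutual
inductive PNode where
  | leaf : List Char → PNode
  | node : List Char → List Char → PForest → PNode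
inductive PForest where
  | nil : PForest
  | cons : PNode → PForest → PForest
end

-- Source B's splitter: top-level comma POSITIONS first (enumerate fold), then slices.
def enumStep (st : List Nat × Int) (p : Int × Char) : List Nat × Int :=
  if p.2 = '(' then (st.1, st.2 + 1)
  else if p.2 = ')' then (st.1, st.2 - 1)
  else if p.2 = ',' ∧ st.2 = 0 then (st.1 ++ [p.1.toNat], st.2)
  else st

def topCuts (inside : List Char) : List Nat :=
  ((PySem.List.enumerate inside).foldl enumStep ([], 0)).1

-- inside[start:j] for 0 ≤ start ≤ j is drop-then-take
def cutStep (l : List Char) (st : List (List Char) × Nat) (j : Nat) : List (List Char) × Nat :=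
  (st.1 ++ [(l.drop st.2).take (j - st.2)], j + 1)

def segsOf (inside : List Char) : List (List Char) :=
  let st := (topCuts inside).foldl (cutStep inside) ([], 0)
  let last := inside.drop st.2
  if last = [] then st.1 else st.1 ++ [last]

mutual
def parseB (fuel : Nat) (t : List Char) : PNode :=
  match fuel with
  | 0 => .leaf t
  | f + 1 =>
    if '(' ∈ t then
      let i := t.findIdx (· = '(')
      let inside := (t.drop (i + 1)).dropLast
      .node t (t.take i) (parseForest f (segsOf inside))
    else .leaf t
termination_by (fuel, 0)
def parseForest (f : Nat) (segs : List (List Char)) : PForest :=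
  match segs with
  | [] => .nil
  | s :: rest => .cons (parseB f s) (parseForest f rest)
termination_by (f, segs.length + 1)
end

mutual
def renderB (n : PNode) (subs : List (List Char × List Char)) : List Char :=
  match n with
  | .leaf t => (List.lookup t subs).getD t
  | .node orig name kids =>
    match List.lookup orig subs with
    | some v => v
    | none => name ++ '(' :: List.intercalate [','] (renderForest kids subs) ++ [')']
def renderForest (fo : PForest) (subs : List (List Char × List Char)) : List (List Char) :=
  match fo with
  | .nil => []
  | .cons n rest => renderB n subs :: renderForest rest subs
end

def apply_subs_alt (term : String) (subs : List (String × String)) : String :=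
  String.ofList (renderB (parseB (term.toList.length + 1) term.toList) (pySubsL subs))

-- ===== PRECONDITION & SPEC =====
def Spec_apply_subs (term : String) (subs : List (String × String)) (out : String) : Prop := out = apply_subs_alt term subs
instance (term : String) (subs : List (String × String)) (out : String) : Decidable (Spec_apply_subs term subs out) := by unfold Spec_apply_subs; infer_instance

-- ===== CLAIM (what is proved, stated in full; the proofs are below) =====
def Claim_equal_apply_subs : Prop := ∀ (term : String) (subs : List (String × String)), Dom_apply_subs term subs → Spec_apply_subs term subs (apply_subs term subs)

-- ===== LEMMAS AND PROOFS =====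

-- proof-level recursive splitter: the common meaning of A's loop and B's cuts+slices
def dval (ch : Char) (d : Int) : Int :=
  if ch = '(' then d + 1 else if ch = ')' then d - 1 else d

def splitAux : List Char → Int → List Char → List (List Char)
  | [], _, cur => if cur = [] then [] else [cur]
  | ch :: rest, d, cur =>
    if ch = ',' ∧ d = 0 then cur :: splitAux rest d []
    else splitAux rest (dval ch d) (cur ++ [ch])

theorem pyLoop_eq (f : Nat) (subs : List (List Char × List Char)) :
    ∀ (inside : List Char) (d : Int) (cur : List Char) (args : List (List Char)),
      pyLoop f subs inside d cur args
        = args ++ (splitAux inside d cur).map (fun s => pyApplySubs f s subs) := by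
  intro inside
  induction inside with
  | nil => intro d cur args; by_cases h : cur = [] <;> simp [pyLoop, splitAux, h]
  | cons ch rest ih =>
    intro d cur args
    by_cases h : ch = ',' ∧ d = 0
    · simp [pyLoop, splitAux, h, ih]
    · simp [pyLoop, splitAux, h, ih, dval]

-- recursive characterisation of Source B's cut positions
def rcuts : List Char → Int → Nat → List Nat
  | [], _, _ => []
  | ch :: rest, d, k =>
    if ch = ',' ∧ d = 0 then k :: rcuts rest d (k + 1) else rcuts rest (dval ch d) (k + 1)

def pdepth (l : List Char) (d : Int) : Int := l.foldl (fun d c => dval c d) d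

theorem topCuts_fold (l : List Char) : ∀ (k : Nat) (d : Int) (acc : List Nat),
    (PySem.List.enumerate l (k : Int)).foldl enumStep (acc, d) = (acc ++ rcuts l d k, pdepth l d) := by
  induction l with
  | nil => intro k d acc; simp [PySem.List.enumerate_nil, rcuts, pdepth]
  | cons ch rest ih =>
    intro k d acc
    rw [PySem.List.enumerate_cons]
    have hk : (k : Int) + 1 = ((k + 1 : Nat) : Int) := by push_cast; ring
    by_cases h1 : ch = '('
    · simp only [List.foldl_cons, enumStep, h1, if_pos]
      have ih' := ih (k + 1) (d + 1) acc
      rw [← hk] at ih'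
      rw [ih']
      simp [rcuts, pdepth, dval]
    · by_cases h2 : ch = ')'
      · simp only [List.foldl_cons, enumStep]
        rw [if_neg (by simp [h2]), if_pos (by simp [h2])]
        have ih' := ih (k + 1) (d - 1) acc
        rw [← hk] at ih'
        rw [ih']
        simp [rcuts, pdepth, dval, h2]
      · by_cases h3 : ch = ',' ∧ d = 0
        · simp only [List.foldl_cons, enumStep]
          rw [if_neg (by simp [h3.1]), if_neg (by simp [h3.1]), if_pos (by simp [h3.1, h3.2])]
          have ih' := ih (k + 1) d (acc ++ [((k : Int)).toNat])
          rw [← hk] at ih'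
          rw [ih']
          simp [rcuts, pdepth, dval, h3.1, h3.2]
        · simp only [List.foldl_cons, enumStep]
          rw [if_neg (by simp [h1]), if_neg (by simp [h2]),
              if_neg (by simpa [Prod.ext_iff] using h3)]
          have ih' := ih (k + 1) d acc
          rw [← hk] at ih'
          rw [ih']
          have hd : dval ch d = d := by
            simp only [dval, if_neg h1, if_neg h2]
          simp [rcuts, pdepth, h3, hd]

theorem topCuts_eq (l : List Char) : topCuts l = rcuts l 0 0 := by
  have h := topCuts_fold l 0 0 []
  rw [show ((0 : Nat) : Int) = (0 : Int) from rfl] at h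
  simp [topCuts, h]

theorem rcuts_shift (l : List Char) : ∀ (d : Int) (k : Nat),
    rcuts l d k = (rcuts l d 0).map (· + k) := by
  induction l with
  | nil => intro d k; simp [rcuts]
  | cons ch rest ih =>
    intro d k
    by_cases h : ch = ',' ∧ d = 0
    · simp only [rcuts, if_pos h, List.map_cons]
      rw [ih d (k + 1), ih d 1, List.map_map, List.cons_eq_cons]
      refine ⟨by omega, List.map_congr_left ?_⟩
      intro j _; simp; omega
    · simp only [rcuts, if_neg h]
      rw [ih (dval ch d) (k + 1), ih (dval ch d) 1, List.map_map]
      apply List.map_congr_left; intro j _; simp; omega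

theorem cutFold_acc (l : List Char) : ∀ (cuts : List Nat) (a : List (List Char)) (s : Nat),
    cuts.foldl (cutStep l) (a, s) =
      (a ++ (cuts.foldl (cutStep l) ([], s)).1, (cuts.foldl (cutStep l) ([], s)).2) := by
  intro cuts
  induction cuts with
  | nil => intro a s; simp
  | cons j more ih =>
    intro a s
    simp only [List.foldl_cons, cutStep]
    rw [ih (a ++ _) (j + 1), ih ([] ++ _) (j + 1)]
    simp

theorem cutFold_shift (ch : Char) (l : List Char) : ∀ (cuts : List Nat) (a : List (List Char)) (s : Nat),
    (cuts.map (· + 1)).foldl (cutStep (ch :: l)) (a, s + 1) =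
      ((cuts.foldl (cutStep l) (a, s)).1, (cuts.foldl (cutStep l) (a, s)).2 + 1) := by
  intro cuts
  induction cuts with
  | nil => intro a s; simp
  | cons j more ih =>
    intro a s
    simp only [List.map_cons, List.foldl_cons, cutStep, List.drop_succ_cons]
    have : j + 1 - (s + 1) = j - s := by omega
    rw [this, ih]

def consHead (c : List Char) : List (List Char) → List (List Char)
  | [] => if c = [] then [] else [c]
  | s :: ss => (c ++ s) :: ss

theorem splitAux_consHead (l : List Char) : ∀ (d : Int) (cur : List Char),
    splitAux l d cur = consHead cur (splitAux l d []) := by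
  induction l with
  | nil => intro d cur; simp [splitAux, consHead]
  | cons ch rest ih =>
    intro d cur
    by_cases h : ch = ',' ∧ d = 0
    · simp [splitAux, h, consHead]
    · simp only [splitAux, if_neg h, List.nil_append]
      rw [ih _ (cur ++ [ch]), ih _ [ch]]
      cases hS : splitAux rest (dval ch d) [] with
      | nil => simp [consHead]
      | cons s ss => simp [consHead]

-- segsOf as a function of the cut list
def segsW (l : List Char) (cuts : List Nat) : List (List Char) :=
  let st := cuts.foldl (cutStep l) ([], 0)
  if l.drop st.2 = [] then st.1 else st.1 ++ [l.drop st.2]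

theorem segsOf_eq_segsW (l : List Char) : segsOf l = segsW l (topCuts l) := rfl

theorem segsW_comma (ch : Char) (rest : List Char) (cuts : List Nat) :
    segsW (ch :: rest) (0 :: cuts.map (· + 1)) = [] :: segsW rest cuts := by
  simp only [segsW, List.foldl_cons]
  have h0 : cutStep (ch :: rest) ([], 0) 0 = ([[]], 1) := by simp [cutStep]
  rw [h0, show (1 : Nat) = 0 + 1 from rfl, cutFold_shift,
      cutFold_acc rest cuts [[]] 0, List.drop_succ_cons]
  by_cases h : rest.drop (cuts.foldl (cutStep rest) ([], 0)).2 = [] <;> simp [h]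

theorem segsW_nocut (ch : Char) (rest : List Char) (cuts : List Nat) :
    segsW (ch :: rest) (cuts.map (· + 1)) = consHead [ch] (segsW rest cuts) := by
  cases cuts with
  | nil =>
    simp only [List.map_nil, segsW, List.foldl_nil, List.drop_zero]
    cases rest with
    | nil => simp [consHead]
    | cons r rs => simp [consHead]
  | cons j more =>
    simp only [List.map_cons, segsW, List.foldl_cons]
    have h0 : cutStep (ch :: rest) ([], 0) (j + 1) = ([ch :: rest.take j], j + 1 + 1) := by
      simp [cutStep, List.take_succ_cons]
    have h1 : cutStep rest ([], 0) j = ([rest.take j], j + 1) := by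
      simp [cutStep]
    rw [h0, h1, cutFold_shift, cutFold_acc rest more [ch :: rest.take j] (j + 1),
        cutFold_acc rest more [rest.take j] (j + 1), List.drop_succ_cons]
    by_cases h : rest.drop (more.foldl (cutStep rest) ([], j + 1)).2 = [] <;>
      simp [h, consHead]

theorem segsW_rcuts (l : List Char) : ∀ (d : Int), segsW l (rcuts l d 0) = splitAux l d [] := by
  induction l with
  | nil => intro d; simp [rcuts, segsW, splitAux]
  | cons ch rest ih =>
    intro d
    by_cases h : ch = ',' ∧ d = 0
    · have hr : rcuts (ch :: rest) d 0 = 0 :: (rcuts rest d 0).map (· + 1) := by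
        simp only [rcuts, if_pos h]
        rw [rcuts_shift rest d 1]
      rw [hr, segsW_comma, ih d]
      simp [splitAux, h]
    · have hr : rcuts (ch :: rest) d 0 = (rcuts rest (dval ch d) 0).map (· + 1) := by
        simp only [rcuts, if_neg h]
        rw [rcuts_shift rest (dval ch d) 1]
      rw [hr, segsW_nocut, ih (dval ch d)]
      rw [← splitAux_consHead]
      simp [splitAux, h]

theorem segsOf_eq (l : List Char) : segsOf l = splitAux l 0 [] := by
  rw [segsOf_eq_segsW, topCuts_eq, segsW_rcuts]

theorem splitAux_length_le (l : List Char) : ∀ (d : Int) (cur s : List Char),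
    s ∈ splitAux l d cur → s.length ≤ cur.length + l.length := by
  induction l with
  | nil =>
    intro d cur s hs
    by_cases h : cur = []
    · simp [splitAux, h] at hs
    · simp [splitAux, h] at hs; subst hs; simp
  | cons ch rest ih =>
    intro d cur s hs
    simp only [splitAux] at hs
    split_ifs at hs with h
    · rcases List.mem_cons.mp hs with h1 | h1
      · subst h1; simp
      · have := ih d [] s h1; simp at this; simp; omega
    · have := ih (dval ch d) (cur ++ [ch]) s hs; simp at this ⊢; omega

theorem renderForest_parseForest (subs : List (List Char × List Char)) (f : Nat) :
    ∀ (segs : List (List Char)),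
      renderForest (parseForest f segs) subs = segs.map (fun s => renderB (parseB f s) subs) := by
  intro segs
  induction segs with
  | nil => simp [parseForest, renderForest]
  | cons s rest ih => simp [parseForest, renderForest, ih]

theorem main_eq (subs : List (List Char × List Char)) :
    ∀ (f : Nat) (t : List Char) (g : Nat), t.length < f → t.length < g →
      pyApplySubs f t subs = renderB (parseB g t) subs := by
  intro f
  induction f with
  | zero => intro t g h; omega
  | succ f ih =>
    intro t g hf hg
    cases g with
    | zero => omega
    | succ g' =>
      by_cases hp : '(' ∈ t
      · have ht : t ≠ [] := by rintro rfl; simp at hp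
        rw [pyApplySubs, parseB]
        simp only [if_pos hp]
        cases hlk : List.lookup t subs with
        | some v => simp [renderB, hlk]
        | none =>
          simp only [renderB, hlk]
          have hinside : ((t.drop (t.findIdx (· = '(') + 1)).dropLast).length < t.length := by
            have h1 : t.length ≥ 1 := by cases t <;> simp_all
            simp [List.length_dropLast, List.length_drop]; omega
          rw [pyLoop_eq, renderForest_parseForest, segsOf_eq]
          simp only [List.nil_append]
          have hmap :
              (splitAux ((t.drop (t.findIdx (· = '(') + 1)).dropLast) 0 []).map
                  (fun s => pyApplySubs f s subs) =
                (splitAux ((t.drop (t.findIdx (· = '(') + 1)).dropLast) 0 []).map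
                  (fun s => renderB (parseB g' s) subs) := by
            apply List.map_congr_left
            intro s hs
            have hlen := splitAux_length_le _ 0 [] s hs
            simp only [List.length_nil, Nat.zero_add] at hlen
            exact ih s g' (by omega) (by omega)
          rw [hmap]
      · rw [pyApplySubs, parseB]
        simp only [if_neg hp]
        cases hlk : List.lookup t subs with
        | some v => simp [renderB, hlk]
        | none => simp [renderB, hlk]

theorem apply_subs_spec : Claim_equal_apply_subs := by
  intro term subs _
  unfold Spec_apply_subs apply_subs apply_subs_alt
  exact congrArg String.ofList
    (main_eq (pySubsL subs) (term.toList.length + 1) term.toList (term.toList.length + 1)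
      (by omega) (by omega))
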